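-- pv_equiv track=rewrite | github.com/Automation-of-diagnosis/diagnosis | funcs.py | sofa
-- ===== SOURCE A (Python) =====
-- from typing import Dict, List, Union
--
-- SOFA: Dict[str, Dict] = {'platelets': {'scale': [150, 100, 50, 20], 'direction': 'down'},
--                          'pao2_fio2': {'scale': [400, 300, 200, 100], 'direction': 'down'},
--                          'gsc': {'scale': [14, 12, 9, 6], 'direction': 'down'},
--                          'creatinine': {'scale': [110, 171, 300, 440], 'direction': 'up'},
--                          'bilirubin': {'scale': [20, 33, 102, 204], 'direction': 'up'},
--                          }
--
-- def sofa_direction(measure: int, scale: list, direction: str) -> int: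
--     if direction == "up":
--         scale = list(scale[::-1])
--     for sofa_points, measure_border in enumerate(scale):
--         if measure > measure_border:
--             return 0 + sofa_points
--     return 4
--
-- def sofa(user_data: Dict[str, int]) -> Union[int, str]:
--     n = 0
--     for measurement in user_data:
--         try:
--             user_data[measurement] = int(user_data[measurement])
--         except TypeError:
--             return 'Вводимые значения должны быть числа'
--         if measurement == 'srad':
--             n += user_data[measurement]
--         elif measurement in SOFA:
--             assesment = sofa_direction(user_data[measurement], SOFA[measurement]['scale'],
--                                        SOFA[measurement]['direction'])
--             n += assesment
--     return n
-- ===== SOURCE B (Python) =====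
-- from typing import Dict, Union
--
-- SOFA: Dict[str, Dict] = {'platelets': {'scale': [150, 100, 50, 20], 'direction': 'down'},
--                          'pao2_fio2': {'scale': [400, 300, 200, 100], 'direction': 'down'},
--                          'gsc': {'scale': [14, 12, 9, 6], 'direction': 'down'},
--                          'creatinine': {'scale': [110, 171, 300, 440], 'direction': 'up'},
--                          'bilirubin': {'scale': [20, 33, 102, 204], 'direction': 'up'},
--                          }
--
-- def sofa(user_data: Dict[str, int]) -> Union[int, str]:
--     n = 0
--     for measurement in user_data:
--         try:
--             value = int(user_data[measurement])
--         except TypeError: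
--             return 'Вводимые значения должны быть числа'
--         user_data[measurement] = value
--         if measurement == 'srad':
--             n += value
--         elif measurement in SOFA:
--             # closed form: the score is 4 minus the number of thresholds the
--             # measure exceeds, for BOTH directions (the reverse in A only
--             # re-orders the thresholds, which the count ignores)
--             n += 4 - sum(1 for border in SOFA[measurement]['scale'] if value > border)
--     return n
-- ===== Notes on version B (the rewrite author's own statement) =====
-- stated objective: simpler
-- what changed: Replaces sofa_direction's reverse-then-linear-scan-with-early-return by a single order-independent closed form inlined into the loop: score = 4 - (number of thresholds the value exceeds), the same for both directions, dropping the helper and the direction field entirely.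
import Mathlib
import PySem

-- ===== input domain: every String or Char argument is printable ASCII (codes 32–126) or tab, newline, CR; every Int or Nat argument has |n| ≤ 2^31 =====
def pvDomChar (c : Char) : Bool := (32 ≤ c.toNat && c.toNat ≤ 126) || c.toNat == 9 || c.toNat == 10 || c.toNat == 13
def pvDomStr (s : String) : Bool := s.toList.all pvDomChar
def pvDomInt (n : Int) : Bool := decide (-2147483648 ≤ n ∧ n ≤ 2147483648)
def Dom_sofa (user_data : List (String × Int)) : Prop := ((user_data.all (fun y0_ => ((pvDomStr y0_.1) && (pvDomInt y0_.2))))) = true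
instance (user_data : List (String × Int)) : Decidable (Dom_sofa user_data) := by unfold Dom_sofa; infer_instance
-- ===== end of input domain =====

-- B replaces A's reverse-and-scan helper by the closed form 4 - #(exceeded thresholds) (simpler).
-- A mutates user_data in place (int() on each value, an identity on ints); equivalence here is about the return value.

-- ===== PORT A =====
-- the SOFA table: key ↦ (scale, direction), in A's insertion order
def sofaTable : List (String × (List Int × String)) :=
  [("platelets", ([150, 100, 50, 20], "down")),
   ("pao2_fio2", ([400, 300, 200, 100], "down")),
   ("gsc", ([14, 12, 9, 6], "down")),
   ("creatinine", ([110, 171, 300, 440], "up")),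
   ("bilirubin", ([20, 33, 102, 204], "up"))]

-- the 'for sofa_points, measure_border in enumerate(scale)' loop with its early return
def sofaDirLoop (measure : Int) : List Int → Int → Int
  | [], _ => 4
  | border :: rest, points => if measure > border then 0 + points else sofaDirLoop measure rest (points + 1)

def sofa_direction (measure : Int) (scale : List Int) (direction : String) : Int :=
  -- scale[::-1] is an exact list reversal
  let scale := if direction == "up" then scale.reverse else scale
  sofaDirLoop measure scale 0

-- the main 'for measurement in user_data' loop; int(v) on an int is v and never raises TypeError,
-- so the except branch is unreachable on Int inputs and the in-place write is an identity
def sofaLoop : Int → List (String × Int) → Int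
  | n, [] => n
  | n, (measurement, v) :: rest =>
      if measurement == "srad" then sofaLoop (n + v) rest
      else
        match sofaTable.lookup measurement with
        | some (scale, direction) => sofaLoop (n + sofa_direction v scale direction) rest
        | none => sofaLoop n rest

def sofa (user_data : List (String × Int)) : Int := sofaLoop 0 user_data

-- ===== PORT B =====
-- Source B keeps only the scales; the direction field is unused
def sofaScales : List (String × List Int) :=
  [("platelets", [150, 100, 50, 20]),
   ("pao2_fio2", [400, 300, 200, 100]),
   ("gsc", [14, 12, 9, 6]),
   ("creatinine", [110, 171, 300, 440]),
   ("bilirubin", [20, 33, 102, 204])]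

def sofa_alt (user_data : List (String × Int)) : Int :=
  user_data.foldl (fun n kv =>
    if kv.1 == "srad" then n + kv.2
    else
      match sofaScales.lookup kv.1 with
      | some scale => n + (4 - (scale.countP (fun border => kv.2 > border) : Int))
      | none => n) 0

-- ===== PRECONDITION & SPEC =====
def Spec_sofa (user_data : List (String × Int)) (out : Int) : Prop := out = sofa_alt user_data
instance (user_data : List (String × Int)) (out : Int) : Decidable (Spec_sofa user_data out) := by unfold Spec_sofa; infer_instance

-- ===== CLAIM (what is proved, stated in full; the proofs are below) =====
def Claim_equal_sofa : Prop := ∀ (user_data : List (String × Int)), Dom_sofa user_data → Spec_sofa user_data (sofa user_data)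

-- ===== LEMMAS AND PROOFS =====

-- A's scored step equals B's closed form, for every key of the table
theorem step_eq (k : String) (v n : Int) :
    (match sofaTable.lookup k with
     | some (scale, direction) => n + sofa_direction v scale direction
     | none => n) =
    (match sofaScales.lookup k with
     | some scale => n + (4 - (scale.countP (fun border => v > border) : Int))
     | none => n) := by
  by_cases h1 : k = "platelets"
  · subst h1; simp [sofaTable, sofaScales, sofa_direction, sofaDirLoop, List.countP, List.countP.go, Bool.cond_decide]
    split_ifs <;> omega
  by_cases h2 : k = "pao2_fio2"
  · subst h2; simp [sofaTable, sofaScales, List.lookup, sofa_direction, sofaDirLoop, List.countP, List.countP.go, Bool.cond_decide]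
    split_ifs <;> omega
  by_cases h3 : k = "gsc"
  · subst h3; simp [sofaTable, sofaScales, List.lookup, sofa_direction, sofaDirLoop, List.countP, List.countP.go, Bool.cond_decide]
    split_ifs <;> omega
  by_cases h4 : k = "creatinine"
  · subst h4; simp [sofaTable, sofaScales, List.lookup, sofa_direction, sofaDirLoop, List.countP, List.countP.go, Bool.cond_decide]
    split_ifs <;> omega
  by_cases h5 : k = "bilirubin"
  · subst h5; simp [sofaTable, sofaScales, List.lookup, sofa_direction, sofaDirLoop, List.countP, List.countP.go, Bool.cond_decide]
    split_ifs <;> omega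
  · have b1 : (k == "platelets") = false := by simp [h1]
    have b2 : (k == "pao2_fio2") = false := by simp [h2]
    have b3 : (k == "gsc") = false := by simp [h3]
    have b4 : (k == "creatinine") = false := by simp [h4]
    have b5 : (k == "bilirubin") = false := by simp [h5]
    simp [sofaTable, sofaScales, List.lookup, b1, b2, b3, b4, b5]

theorem loop_eq (l : List (String × Int)) (n : Int) :
    sofaLoop n l = l.foldl (fun n kv =>
      if kv.1 == "srad" then n + kv.2
      else
        match sofaScales.lookup kv.1 with
        | some scale => n + (4 - (scale.countP (fun border => kv.2 > border) : Int))
        | none => n) n := by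
  induction l generalizing n with
  | nil => rfl
  | cons kv rest ih =>
    obtain ⟨k, v⟩ := kv
    by_cases hk : k == "srad"
    · have hk' : k = "srad" := by simpa using hk
      subst hk'
      simp [sofaLoop, ih]
    · have hstep := step_eq k v n
      simp only [sofaLoop, hk, List.foldl_cons, Bool.false_eq_true, if_false]
      cases hA : sofaTable.lookup k with
      | some p =>
        obtain ⟨scale, dir⟩ := p
        rw [hA] at hstep
        simp only at hstep ⊢
        rw [ih, hstep]
      | none =>
        rw [hA] at hstep
        simp only at hstep ⊢
        rw [ih, ← hstep]

-- ===== VERDICT (by name: the statement is the Claim_ definition above) =====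
theorem sofa_spec : Claim_equal_sofa := by
  intro user_data _
  unfold Spec_sofa sofa sofa_alt
  exact loop_eq user_data 0
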